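-- pv_equiv track=rewrite | github.com/Kobetc/Python_Labs | lab_1_task_11-14_variant_5.py | getMedianOfStringByASCII
-- ===== SOURCE A (Python) =====
-- def getMedianOfStringByASCII(string):
--
--     # Длина строки
--     lenOfString = len(string)
--
--     # Список, в который будут помещены ASCII коды символов строки
--     asciiList = []
--
--     # Расчитанное медианное значение ASCII кодов символов строки
--     medianOfStringByASCII = 0
--
--     # Заполняем список ASCII кодами символов строки
--     for char in string:
--         asciiList.append(ord(char))
--
--     # Сортируем список с кодами по возрастанию
--     sortedAsciiList = sorted(asciiList)
--
--     # Если длина строки делится на два без остатка, значит длина - четное число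
--     if lenOfString % 2 == 0:
--
--         # Берем два центральных элемента списка
--         twoCenterItems = sortedAsciiList[(
--             lenOfString // 2 - 1):(lenOfString // 2 + 1)]
--
--         # Определяем среднее арифметическое медлу двумя центральными элементами, это будет медиальным значением
--         medianOfStringByASCII = sum(twoCenterItems) // 2
--     else:
--         # Если длина строки не четное число, берем центральный элемент списка, это будет медиальным значением
--         centerItem = sortedAsciiList[lenOfString // 2]
--         medianOfStringByASCII = centerItem
--
--     # Возвращаем найденное медианное значение ASCII кодов символов строки
--     return medianOfStringByASCII
-- ===== SOURCE B (Python) =====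
-- def getMedianOfStringByASCII(string):
--     n = len(string)
--     if n == 0:
--         return 0
--     counts = [0] * 128
--     for ch in string:
--         counts[ord(ch)] += 1
--     lo = (n - 1) // 2
--     hi = n // 2
--     seen = 0
--     a = None
--     for code in range(128):
--         seen += counts[code]
--         if a is None and seen > lo:
--             a = code
--         if seen > hi:
--             return (a + code) // 2
--     return 0
-- ===== Notes on version B (the rewrite author's own statement) =====
-- stated objective: faster
-- what changed: B replaces building a list of codes and sorting it by a counting pass over the 128 ASCII codes followed by one cumulative scan that picks the two middle order statistics.
import Mathlib
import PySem

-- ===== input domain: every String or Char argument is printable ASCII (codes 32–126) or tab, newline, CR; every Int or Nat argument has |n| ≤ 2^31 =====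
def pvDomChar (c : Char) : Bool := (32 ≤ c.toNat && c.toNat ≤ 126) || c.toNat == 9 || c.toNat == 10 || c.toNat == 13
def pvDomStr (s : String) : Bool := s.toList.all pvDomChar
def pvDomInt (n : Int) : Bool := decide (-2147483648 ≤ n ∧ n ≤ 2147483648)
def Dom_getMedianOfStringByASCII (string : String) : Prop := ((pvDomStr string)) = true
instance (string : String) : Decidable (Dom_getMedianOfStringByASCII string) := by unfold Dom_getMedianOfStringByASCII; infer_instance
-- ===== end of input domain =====

-- B replaces sort-then-index by a counting pass over the 128 ASCII codes plus one cumulative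
-- scan that picks the two middle order statistics (objective: faster, asymptotic).


-- ===== PORT A =====
def getMedianOfStringByASCII (string : String) : Int :=
  let lenOfString := string.toList.length
  let asciiList : List Int := string.toList.foldl (fun acc char => acc ++ [(char.toNat : Int)]) []
  let sortedAsciiList := PySem.List.sorted asciiList id
  if PySem.Int.mod (lenOfString : Int) 2 = 0 then
    let twoCenterItems := PySem.List.slice sortedAsciiList
      (some (PySem.Int.floordiv (lenOfString : Int) 2 - 1))
      (some (PySem.Int.floordiv (lenOfString : Int) 2 + 1))
    PySem.Int.floordiv twoCenterItems.sum 2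
  else
    -- for odd length the index lenOfString // 2 is always in range: pyGet? is some, the .getD 0 is unreachable
    (PySem.List.pyGet? sortedAsciiList (PySem.Int.floordiv (lenOfString : Int) 2)).getD 0

-- ===== PORT B =====
-- B's `for code in range(128)` loop with its early `return (a + code) // 2`.
def pvMedLoop (counts : List Int) (lo hi : Int) : List Int → Int → Option Int → Int
  | [], _, _ => 0
  | code :: rest, seen, a =>
    let seen' := seen + PySem.List.pyGetD counts code 0    -- counts[code]; code always in range 0..127
    let a' := if a.isNone && decide (lo < seen') then some code else a
    if hi < seen' then PySem.Int.floordiv (a'.getD 0 + code) 2  -- a is always set here; .getD 0 unreachable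
    else pvMedLoop counts lo hi rest seen' a'

def getMedianOfStringByASCII_alt (string : String) : Int :=
  let n := string.toList.length
  if n = 0 then 0
  else
    -- counts[ord(ch)] += 1; on the ASCII domain ord ch < 128 so the Python index is in range
    let counts := string.toList.foldl
      (fun cs ch => cs.set ch.toNat (cs.getD ch.toNat 0 + 1)) (List.replicate 128 (0 : Int))
    let lo := PySem.Int.floordiv ((n : Int) - 1) 2
    let hi := PySem.Int.floordiv (n : Int) 2
    pvMedLoop counts lo hi (PySem.List.pyRange 0 128) 0 none

-- ===== PRECONDITION & SPEC =====
def Spec_getMedianOfStringByASCII (string : String) (out : Int) : Prop := out = getMedianOfStringByASCII_alt string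
instance (string : String) (out : Int) : Decidable (Spec_getMedianOfStringByASCII string out) := by unfold Spec_getMedianOfStringByASCII; infer_instance

-- ===== CLAIM (what is proved, stated in full; the proofs are below) =====
def Claim_equal_getMedianOfStringByASCII : Prop := ∀ (string : String), Dom_getMedianOfStringByASCII string → Spec_getMedianOfStringByASCII string (getMedianOfStringByASCII string)

-- ===== LEMMAS AND PROOFS =====

-- the ASCII codes of the characters, and the number of codes ≤ c
def pvCodes (l : List Char) : List Int := l.map (fun ch => (ch.toNat : Int))

def pvN (l : List Char) (c : Int) : Nat := (pvCodes l).countP (fun x => decide (x ≤ c))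

-- selection in a sorted list, characterised by counting
lemma pv_sel_le_iff (s : List Int) (hs : s.Pairwise (· ≤ ·)) (k : Nat) (hk : k < s.length) (c : Int) :
    s[k] ≤ c ↔ k < s.countP (fun x => decide (x ≤ c)) := by
  induction s generalizing k with
  | nil => simp at hk
  | cons x t ih =>
    rcases List.pairwise_cons.mp hs with ⟨hx, ht⟩
    cases k with
    | zero =>
      by_cases hxc : x ≤ c
      · simp [hxc]
      · have h0 : t.countP (fun x => decide (x ≤ c)) = 0 :=
          List.countP_eq_zero.mpr (fun y hy => by
            have := hx y hy; simp; omega)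
        simp [hxc, h0]
    | succ k =>
      have hk' : k < t.length := by simpa using hk
      have hIH := ih ht k hk'
      by_cases hxc : x ≤ c
      · simpa [List.countP_cons, hxc, Nat.succ_lt_succ_iff] using hIH
      · have h0 : t.countP (fun x => decide (x ≤ c)) = 0 :=
          List.countP_eq_zero.mpr (fun y hy => by
            have := hx y hy; simp; omega)
        have hmem : t[k] ∈ t := List.getElem_mem hk'
        have := hx _ hmem
        simp only [List.getElem_cons_succ, List.countP_cons, hxc]
        simp [h0]; omega

-- counting ≤ c splits into ≤ c-1 and = c
lemma pv_countP_split (xs : List Int) (c : Int) :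
    xs.countP (fun x => decide (x ≤ c)) =
      xs.countP (fun x => decide (x ≤ c - 1)) + xs.countP (fun x => decide (x = c)) := by
  induction xs with
  | nil => simp
  | cons y t ih => simp only [List.countP_cons]; split_ifs <;> simp_all <;> omega

-- the counting pass: entry c of the counts array is the multiplicity of code c
lemma pv_counts_getD (l : List Char) : ∀ (cs : List Int), cs.length = 128 →
    (∀ ch ∈ l, ch.toNat < 128) → ∀ c : Nat, c < 128 →
    (l.foldl (fun cs ch => cs.set ch.toNat (cs.getD ch.toNat 0 + 1)) cs).getD c 0 =
      cs.getD c 0 + (l.countP (fun ch => decide (ch.toNat = c)) : Int) := by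
  induction l with
  | nil => intro cs _ _ c _; simp
  | cons ch t ih =>
    intro cs hlen hmem c hc
    have hch : ch.toNat < 128 := hmem ch (by simp)
    have hlen' : (cs.set ch.toNat (cs.getD ch.toNat 0 + 1)).length = 128 := by simp [hlen]
    have hstep := ih (cs.set ch.toNat (cs.getD ch.toNat 0 + 1)) hlen'
      (fun x hx => hmem x (by simp [hx])) c hc
    simp only [List.foldl_cons]
    rw [hstep]
    by_cases he : ch.toNat = c
    · subst he
      simp [List.getD, hlen, hch]
      omega
    · simp [List.getD, he]

-- the cumulative scan returns the floor-average of the two middle order statistics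
lemma pv_loop (l : List Char) (counts : List Int) (lo hi : Int) (s : List Int)
    (hsp : s.Pairwise (· ≤ ·))
    (hperm : ∀ p : Int → Bool, s.countP p = (pvCodes l).countP p)
    (hcount : ∀ c : Nat, c < 128 →
      PySem.List.pyGetD counts ((c : Nat) : Int) 0 = ((pvCodes l).countP (fun x => decide (x = (c : Int))) : Int))
    (hlen : s.length = l.length)
    (hlo : 0 ≤ lo) (hlohi : lo ≤ hi) (hhi : hi.toNat < l.length)
    (hN127 : pvN l 127 = l.length) :
    ∀ (m c : Nat) (a : Option Int), c + m = 128 →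
      (a = none → ((pvN l ((c : Int) - 1) : Int) ≤ lo)) →
      (∀ v, a = some v → lo < (pvN l ((c : Int) - 1) : Int) ∧ v = s.getD lo.toNat 0) →
      ((pvN l ((c : Int) - 1) : Int) ≤ hi) →
      pvMedLoop counts lo hi (PySem.List.pyRange (c : Int) 128) ((pvN l ((c : Int) - 1) : Int)) a =
        PySem.Int.floordiv (s.getD lo.toNat 0 + s.getD hi.toNat 0) 2 := by
  have hloLen : lo.toNat < s.length := by omega
  have hhiLen : hi.toNat < s.length := by omega
  -- selection characterisation specialised to this s
  have hsel : ∀ (k : Nat), k < s.length → ∀ c : Int,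
      (s.getD k 0 ≤ c ↔ (k : Int) < (pvN l c : Int)) := by
    intro k hk c
    rw [List.getD_eq_getElem s 0 hk]
    rw [pv_sel_le_iff s hsp k hk c]
    unfold pvN
    rw [hperm]
    exact_mod_cast Iff.rfl
  intro m
  induction m with
  | zero =>
    intro c a hcm _ _ hNhi
    exfalso
    have hc : c = 128 := by omega
    subst hc
    have h127 : ((128 : Nat) : Int) - 1 = (127 : Int) := by norm_num
    rw [h127, hN127] at hNhi
    omega
  | succ m ih =>
    intro c a hcm hanone hasome hNhi
    have hclt : (c : Int) < 128 := by exact_mod_cast (by omega : c < 128)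
    rw [PySem.List.pyRange_one_cons hclt]
    simp only [pvMedLoop]
    have hsplit := pv_countP_split (pvCodes l) (c : Int)
    have hseen' : (pvN l ((c : Int) - 1) : Int) + PySem.List.pyGetD counts ((c : Nat) : Int) 0
        = (pvN l (c : Int) : Int) := by
      rw [hcount c (by omega)]
      unfold pvN
      omega
    rw [hseen']
    by_cases hbrk : hi < (pvN l (c : Int) : Int)
    · -- break: this code is the upper middle element
      have hshi : s.getD hi.toNat 0 = (c : Int) := by
        have h1 : s.getD hi.toNat 0 ≤ (c : Int) := (hsel hi.toNat hhiLen (c : Int)).mpr (by omega)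
        have h2 : ¬ s.getD hi.toNat 0 ≤ (c : Int) - 1 := by
          rw [hsel hi.toNat hhiLen ((c : Int) - 1)]; omega
        omega
      have ha' : (if a.isNone && decide (lo < (pvN l (c : Int) : Int)) then some ((c : Nat) : Int) else a).getD 0
          = s.getD lo.toNat 0 := by
        cases a with
        | none =>
          have hlo' : lo < (pvN l (c : Int) : Int) := by omega
          have hslo : s.getD lo.toNat 0 = (c : Int) := by
            have h1 : s.getD lo.toNat 0 ≤ (c : Int) := (hsel lo.toNat hloLen (c : Int)).mpr (by omega)
            have h2 : ¬ s.getD lo.toNat 0 ≤ (c : Int) - 1 := by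
              rw [hsel lo.toNat hloLen ((c : Int) - 1)]
              have := hanone rfl; omega
            omega
          rw [if_pos (by simp [hlo'])]
          rw [Option.getD_some, hslo]
        | some v =>
          rw [if_neg (by simp), Option.getD_some]
          exact (hasome v rfl).2
      rw [if_pos (by exact_mod_cast hbrk)]
      rw [ha', hshi]
    · -- continue scanning
      rw [if_neg (by exact_mod_cast hbrk)]
      set a' := (if a.isNone && decide (lo < (pvN l (c : Int) : Int)) then some ((c : Nat) : Int) else a) with ha'def
      have hinv1 : a' = none → (pvN l (c : Int) : Int) ≤ lo := by
        intro h
        rw [ha'def] at h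
        by_cases hcond : (a.isNone && decide (lo < (pvN l (c : Int) : Int))) = true
        · rw [if_pos hcond] at h; exact absurd h (by simp)
        · rw [if_neg hcond] at h
          rw [h] at hcond
          simp at hcond
          omega
      have hinv2 : ∀ v, a' = some v → lo < (pvN l (c : Int) : Int) ∧ v = s.getD lo.toNat 0 := by
        intro v hv
        rw [ha'def] at hv
        by_cases hcond : (a.isNone && decide (lo < (pvN l (c : Int) : Int))) = true
        · rw [if_pos hcond] at hv
          rw [Bool.and_eq_true, decide_eq_true_eq, Option.isNone_iff_eq_none] at hcond
          obtain ⟨hnone, hlo'⟩ := hcond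
          have hslo : s.getD lo.toNat 0 = (c : Int) := by
            have g1 : s.getD lo.toNat 0 ≤ (c : Int) := (hsel lo.toNat hloLen (c : Int)).mpr (by omega)
            have g2 : ¬ s.getD lo.toNat 0 ≤ (c : Int) - 1 := by
              rw [hsel lo.toNat hloLen ((c : Int) - 1)]
              have := hanone hnone; omega
            omega
          injection hv with hv'
          exact ⟨hlo', by rw [← hv', hslo]⟩
        · rw [if_neg hcond] at hv
          obtain ⟨g1, g2⟩ := hasome v hv
          have hmono : (pvN l ((c : Int) - 1) : Int) ≤ (pvN l (c : Int) : Int) := by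
            unfold pvN; rw [hsplit]; push_cast; omega
          exact ⟨by omega, g2⟩
      have hc1 : ((c + 1 : Nat) : Int) = (c : Int) + 1 := by push_cast; ring
      have hres := ih (c + 1) a' (by omega)
        (by rw [hc1]; have : (c : Int) + 1 - 1 = (c : Int) := by ring
            rw [this]; exact hinv1)
        (by rw [hc1]; have : (c : Int) + 1 - 1 = (c : Int) := by ring
            rw [this]; exact hinv2)
        (by rw [hc1]; have : (c : Int) + 1 - 1 = (c : Int) := by ring
            rw [this]; omega)
      rw [hc1] at hres
      have hsimp : (c : Int) + 1 - 1 = (c : Int) := by ring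
      rw [hsimp] at hres
      exact hres

theorem getMedianOfStringByASCII_spec : Claim_equal_getMedianOfStringByASCII := by
  intro string hdom
  unfold Spec_getMedianOfStringByASCII getMedianOfStringByASCII getMedianOfStringByASCII_alt
  have hall : ∀ ch ∈ string.toList, ch.toNat < 128 := by
    intro ch hch
    unfold Dom_getMedianOfStringByASCII pvDomStr at hdom
    rw [List.all_eq_true] at hdom
    have := hdom ch hch
    unfold pvDomChar at this
    simp at this
    omega
  set l := string.toList with hl
  by_cases hn : l.length = 0
  · -- empty string: A computes the even branch on the empty list, B returns 0
    rw [List.length_eq_zero_iff] at hn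
    rw [hn]
    norm_num [pvCodes, PySem.List.sorted, PySem.List.slice, PySem.List.clampIdx,
      PySem.Int.mod, PySem.Int.floordiv]
  · rw [PySem.List.foldl_append_singleton_eq_map (fun char => ((char.toNat : Nat) : Int)) l []]
    rw [List.nil_append]
    rw [if_neg hn]
    set n := l.length with hnn
    have hn1 : 1 ≤ n := by omega
    set s := PySem.List.sorted (l.map fun char => ((char.toNat : Nat) : Int)) id with hs
    have hcodes : (l.map fun char => ((char.toNat : Nat) : Int)) = pvCodes l := rfl
    have hsp : s.Pairwise (· ≤ ·) := by
      have := PySem.List.sorted_pairwise (l.map fun char => ((char.toNat : Nat) : Int)) id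
      simpa using this
    have hperm : ∀ p : Int → Bool, s.countP p = (pvCodes l).countP p := by
      intro p
      rw [hs, hcodes]
      exact (PySem.List.sorted_perm (pvCodes l) id false).countP_eq p
    have hslen : s.length = n := by
      rw [hs, PySem.List.length_sorted, List.length_map]
    set counts := l.foldl (fun cs ch => cs.set ch.toNat (cs.getD ch.toNat 0 + 1))
        (List.replicate 128 (0 : Int)) with hcnt
    have hcount : ∀ c : Nat, c < 128 →
        PySem.List.pyGetD counts ((c : Nat) : Int) 0 =
          ((pvCodes l).countP (fun x => decide (x = (c : Int))) : Int) := by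
      intro c hc
      rw [PySem.List.pyGetD_natCast]
      rw [hcnt, pv_counts_getD l (List.replicate 128 (0 : Int)) (by simp) hall c hc]
      have hrep : (List.replicate 128 (0 : Int)).getD c 0 = 0 := by
        have hcl : c < (List.replicate 128 (0 : Int)).length := by
          rw [List.length_replicate]; exact hc
        rw [List.getD_eq_getElem _ 0 hcl, List.getElem_replicate]
      rw [hrep, zero_add]
      congr 1
      rw [pvCodes, List.countP_map]
      apply List.countP_congr
      intro ch _
      simp
    set Lo := (n - 1) / 2 with hLo
    set Hi := n / 2 with hHi
    have hlo_eq : PySem.Int.floordiv ((n : Int) - 1) 2 = (Lo : Int) := by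
      rw [PySem.Int.floordiv_eq_iff_of_pos (by norm_num)]
      omega
    have hhi_eq : PySem.Int.floordiv (n : Int) 2 = (Hi : Int) := by
      rw [PySem.Int.floordiv_eq_iff_of_pos (by norm_num)]
      omega
    have hN127 : pvN l 127 = n := by
      unfold pvN
      have hall' : ∀ x ∈ pvCodes l, (fun x => decide (x ≤ (127 : Int))) x = true := by
        intro x hx
        rw [pvCodes, List.mem_map] at hx
        obtain ⟨ch, hch, rfl⟩ := hx
        have := hall ch hch
        simp
        omega
      rw [List.countP_eq_length.mpr hall', pvCodes, List.length_map]
    have hN0 : pvN l (((0 : Nat) : Int) - 1) = 0 := by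
      unfold pvN
      rw [List.countP_eq_zero]
      intro x hx
      rw [pvCodes, List.mem_map] at hx
      obtain ⟨ch, hch, rfl⟩ := hx
      simp
      omega
    have hHiLt : Hi < n := by omega
    have hB := pv_loop l counts ((Lo : Nat) : Int) ((Hi : Nat) : Int) s hsp hperm hcount
      (hslen.trans hnn) (Int.natCast_nonneg Lo)
      (by exact_mod_cast (by omega : Lo ≤ Hi))
      (by simpa using hHiLt) hN127 128 0 none (by norm_num)
      (by intro _; rw [hN0]; omega)
      (by intro v hv; cases hv)
      (by rw [hN0]; omega)
    rw [hN0] at hB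
    simp only [Nat.cast_zero, Int.toNat_natCast] at hB
    rw [hlo_eq, hhi_eq, hB]
    clear hB
    by_cases hpar : n % 2 = 0
    · -- even length
      have hmod : PySem.Int.mod ((n : Nat) : Int) 2 = 0 := by
        have hcast : PySem.Int.mod ((n : Nat) : Int) 2 = ((n % 2 : Nat) : Int) := by
          exact_mod_cast PySem.Int.mod_natCast n 2
        rw [hcast, hpar]
        norm_num
      rw [if_pos hmod, hhi_eq]
      have hHi1 : 1 ≤ Hi := by omega
      have ha : ((Hi : Nat) : Int) - 1 = ((Hi - 1 : Nat) : Int) := by omega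
      have hb : ((Hi : Nat) : Int) + 1 = ((Hi + 1 : Nat) : Int) := by omega
      rw [ha, hb, PySem.List.slice_natCast]
      have htk : Hi + 1 - (Hi - 1) = 2 := by omega
      rw [htk]
      have hi1 : Hi - 1 < s.length := by omega
      have hi2 : Hi < s.length := by omega
      rw [List.drop_eq_getElem_cons hi1]
      have hstep : Hi - 1 + 1 = Hi := by omega
      rw [hstep, List.drop_eq_getElem_cons hi2]
      simp only [List.take_succ_cons, List.take_zero, List.sum_cons, List.sum_nil, add_zero]
      have hLoHi : Lo = Hi - 1 := by omega
      rw [hLoHi]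
      rw [List.getD_eq_getElem s 0 (by omega), List.getD_eq_getElem s 0 (by omega)]
    · -- odd length
      have hmod : ¬ PySem.Int.mod ((n : Nat) : Int) 2 = 0 := by
        have hcast : PySem.Int.mod ((n : Nat) : Int) 2 = ((n % 2 : Nat) : Int) := by
          exact_mod_cast PySem.Int.mod_natCast n 2
        rw [hcast]
        exact_mod_cast hpar
      rw [if_neg hmod, hhi_eq]
      rw [PySem.List.pyGet?_natCast]
      rw [List.getElem?_eq_getElem (by omega : Hi < s.length)]
      rw [Option.getD_some]
      have hLoHi : Lo = Hi := by omega
      rw [hLoHi]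
      rw [List.getD_eq_getElem s 0 (by omega : Hi < s.length)]
      symm
      rw [PySem.Int.floordiv_eq_iff_of_pos (by norm_num)]
      omega
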